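-- pv_equiv track=rewrite | github.com/dkdud1871/Algorithm-baekjoon- | 프로그래머스/lv1/42840. 모의고사/모의고사.py | solution
-- ===== SOURCE A (Python) =====
-- def solution(answers):
--     num1=[1,2,3,4,5]
--     num2=[2,1,2,3,2,4,2,5]
--     num3=[3,3,1,1,2,2,4,4,5,5]
--     answer = []
--     score=[0]*3
--
--     for i in range(len(answers)):
--         if answers[i]== num1[i%5]:
--             score[0]+=1
--         if answers[i]== num2[i%8]:
--             score[1]+=1
--         if answers[i]== num3[i%10]:
--             score[2]+=1
--
--     for j in range(len(score)):
--         if score[j]== max(score):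
--             answer.append(j+1)
--     return answer
-- ===== SOURCE B (Python) =====
-- def solution(answers):
--     patterns = [[1, 2, 3, 4, 5],
--                 [2, 1, 2, 3, 2, 4, 2, 5],
--                 [3, 3, 1, 1, 2, 2, 4, 4, 5, 5]]
--
--     def score(pat):
--         s = 0
--         rest = pat
--         for a in answers:
--             if not rest:
--                 rest = pat
--             if a == rest[0]:
--                 s += 1
--             rest = rest[1:]
--         return s
--
--     scores = [score(p) for p in patterns]
--     m = max(scores)
--     return [i + 1 for i, s in enumerate(scores) if s == m]
-- ===== Notes on version B (the rewrite author's own statement) =====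
-- stated objective: alternative
-- what changed: One combined index loop with i%5/i%8/i%10 lookups is replaced by three per-pattern passes that walk the answers carrying the remaining cyclic pattern suffix (no index arithmetic), and the winner list is built by enumerate-filter instead of a second index loop.
import Mathlib
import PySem

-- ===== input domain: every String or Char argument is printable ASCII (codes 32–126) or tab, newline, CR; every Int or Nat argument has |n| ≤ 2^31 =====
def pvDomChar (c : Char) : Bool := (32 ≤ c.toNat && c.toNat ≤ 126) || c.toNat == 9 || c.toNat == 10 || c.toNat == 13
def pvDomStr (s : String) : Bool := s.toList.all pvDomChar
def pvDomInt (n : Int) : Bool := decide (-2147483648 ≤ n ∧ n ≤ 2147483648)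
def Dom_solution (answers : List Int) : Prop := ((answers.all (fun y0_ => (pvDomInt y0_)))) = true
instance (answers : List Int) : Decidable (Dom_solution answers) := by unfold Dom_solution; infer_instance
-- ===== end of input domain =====

-- B replaces A's single combined i%5/i%8/i%10 index loop by three per-pattern passes that
-- carry the remaining cyclic pattern suffix, and builds the winners by enumerate-filter
-- (objective: alternative decomposition, same cost).

-- ===== PORT A =====
-- body of A's first loop (the three 'if … : score[k] += 1' updates at index i)
def solnStepA (answers : List Int) (sc : List Int) (i : Int) : List Int :=
  let sc := if PySem.List.pyGetD answers i 0
               = PySem.List.pyGetD [(1 : Int), 2, 3, 4, 5] (PySem.Int.mod i 5) 0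
            then sc.set 0 (sc.getD 0 0 + 1) else sc
  let sc := if PySem.List.pyGetD answers i 0
               = PySem.List.pyGetD [(2 : Int), 1, 2, 3, 2, 4, 2, 5] (PySem.Int.mod i 8) 0
            then sc.set 1 (sc.getD 1 0 + 1) else sc
  let sc := if PySem.List.pyGetD answers i 0
               = PySem.List.pyGetD [(3 : Int), 3, 1, 1, 2, 2, 4, 4, 5, 5] (PySem.Int.mod i 10) 0
            then sc.set 2 (sc.getD 2 0 + 1) else sc
  sc

-- body of A's second loop ('if score[j] == max(score): answer.append(j+1)')
def solnAppend (score : List Int) (ans : List Int) (j : Int) : List Int :=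
  if PySem.List.pyGetD score j 0 = (PySem.List.max? score (fun y => y)).getD 0
  then ans ++ [j + 1] else ans

def solution (answers : List Int) : List Int :=
  let score : List Int :=
    (PySem.List.pyRange 0 (answers.length : Int) 1).foldl (solnStepA answers) [0, 0, 0]
  (PySem.List.pyRange 0 (score.length : Int) 1).foldl (solnAppend score) []

-- ===== PORT B =====
-- the inner 'score' loop of Source B: state (s, rest)
def scoreStep (pat : List Int) (st : Int × List Int) (a : Int) : Int × List Int :=
  let rest := if st.2 = [] then pat else st.2
  ((if a = rest.headD 0 then st.1 + 1 else st.1), rest.tail)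

def scoreB (answers pat : List Int) : Int :=
  (answers.foldl (scoreStep pat) (0, pat)).1

def solution_alt (answers : List Int) : List Int :=
  let patterns : List (List Int) :=
    [[1, 2, 3, 4, 5], [2, 1, 2, 3, 2, 4, 2, 5], [3, 3, 1, 1, 2, 2, 4, 4, 5, 5]]
  let scores := patterns.map (fun p => scoreB answers p)
  let m := (PySem.List.max? scores (fun y => y)).getD 0
  (PySem.List.enumerate scores 0).filterMap
    (fun is => if is.2 = m then some (is.1 + 1) else none)

-- ===== PRECONDITION & SPEC =====
def Spec_solution (answers : List Int) (out : List Int) : Prop := out = solution_alt answers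
instance (answers : List Int) (out : List Int) : Decidable (Spec_solution answers out) := by unfold Spec_solution; infer_instance

-- ===== CLAIM (what is proved, stated in full; the proofs are below) =====
def Claim_equal_solution : Prop := ∀ (answers : List Int), Dom_solution answers → Spec_solution answers (solution answers)

-- ===== LEMMAS AND PROOFS =====

-- proof-only: number of positions j with xs[j] = pat[(k+j) % L] (L = pat.length at use sites)
def cm (pat : List Int) (L : Nat) : List Int → Nat → Int
  | [], _ => 0
  | a :: as, k => (if a = pat.getD (k % L) 0 then 1 else 0) + cm pat L as (k + 1)

-- B's loop computes cm
lemma scoreStep_foldl_eq_cm (pat : List Int) (L : Nat) (hL : pat.length = L) (hpat : pat ≠ []) :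
    ∀ (xs : List Int) (k m : Nat) (s : Int), m ≤ pat.length → m % pat.length = k % pat.length →
    (xs.foldl (scoreStep pat) (s, pat.drop m)).1 = s + cm pat L xs k := by
  subst hL
  intro xs
  induction xs with
  | nil => intro k m s _ _; simp [cm]
  | cons a as ih =>
    intro k m s hm hk
    have hL : 0 < pat.length := List.length_pos_of_ne_nil hpat
    by_cases hmL : m = pat.length
    · -- rest is exhausted: reset to the full pattern
      have h0 : k % pat.length = 0 := by
        have : m % pat.length = 0 := by rw [hmL]; exact Nat.mod_self _
        omega
      have hk1 : (1 : Nat) % pat.length = (k + 1) % pat.length := by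
        have hk0 : Nat.ModEq pat.length k 0 := by
          show k % pat.length = 0 % pat.length
          simpa using h0
        exact (hk0.add_right 1).symm
      simp only [List.foldl_cons, scoreStep, hmL, List.drop_length, reduceIte]
      have hhead : pat.headD 0 = pat.getD (k % pat.length) 0 := by
        rw [h0]
        cases pat with
        | nil => simp at hpat
        | cons p ps => simp [List.getD]
      have htail : pat.tail = pat.drop 1 := by simp
      rw [hhead, htail, ih (k + 1) 1 _ hL hk1]
      simp only [cm]; split_ifs <;> ring
    · have hmlt : m < pat.length := by omega
      have hne : pat.drop m ≠ [] := by
        intro h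
        have hlen := congrArg List.length h
        simp only [List.length_drop, List.length_nil] at hlen
        omega
      have hk1 : (m + 1) % pat.length = (k + 1) % pat.length :=
        Nat.ModEq.add_right 1 hk
      simp only [List.foldl_cons, scoreStep, if_neg hne]
      have hhead : (pat.drop m).headD 0 = pat.getD (k % pat.length) 0 := by
        rw [← hk, Nat.mod_eq_of_lt hmlt]
        rw [List.headD_eq_head?, List.head?_drop, List.getD_eq_getElem?_getD]
      have htail : (pat.drop m).tail = pat.drop (m + 1) := by
        rw [List.tail_drop]
      rw [hhead, htail, ih (k + 1) (m + 1) _ (by omega) hk1]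
      simp only [cm]; split_ifs <;> ring

lemma scoreB_eq_cm (answers pat : List Int) (L : Nat) (hL : pat.length = L) (hpat : pat ≠ []) :
    scoreB answers pat = cm pat L answers 0 := by
  have := scoreStep_foldl_eq_cm pat L hL hpat answers 0 0 0 (by omega) rfl
  simpa [scoreB] using this

-- proof-only: A's loop body with the current answer passed in directly
def stepA (sc : List Int) (i a : Int) : List Int :=
  let sc := if a = PySem.List.pyGetD [(1 : Int), 2, 3, 4, 5] (PySem.Int.mod i 5) 0
            then sc.set 0 (sc.getD 0 0 + 1) else sc
  let sc := if a = PySem.List.pyGetD [(2 : Int), 1, 2, 3, 2, 4, 2, 5] (PySem.Int.mod i 8) 0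
            then sc.set 1 (sc.getD 1 0 + 1) else sc
  let sc := if a = PySem.List.pyGetD [(3 : Int), 3, 1, 1, 2, 2, 4, 4, 5, 5] (PySem.Int.mod i 10) 0
            then sc.set 2 (sc.getD 2 0 + 1) else sc
  sc

lemma solnStepA_eq (answers : List Int) :
    solnStepA answers = fun sc i => stepA sc i (PySem.List.pyGetD answers i 0) := rfl

-- A's combined loop, over enumerate, computes the three cm's at once
lemma A_loop_enum :
    ∀ (xs : List Int) (k : Nat) (s1 s2 s3 : Int),
    (PySem.List.enumerate xs (k : Int)).foldl (fun sc p => stepA sc p.1 p.2) [s1, s2, s3]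
    = [s1 + cm [1, 2, 3, 4, 5] 5 xs k,
       s2 + cm [2, 1, 2, 3, 2, 4, 2, 5] 8 xs k,
       s3 + cm [3, 3, 1, 1, 2, 2, 4, 4, 5, 5] 10 xs k] := by
  intro xs
  induction xs with
  | nil => intro k s1 s2 s3; simp [cm]
  | cons a as ih =>
    intro k s1 s2 s3
    rw [PySem.List.enumerate_cons]
    simp only [List.foldl_cons]
    have hcast : (k : Int) + 1 = ((k + 1 : Nat) : Int) := by push_cast; ring
    have e1 : PySem.List.pyGetD [(1 : Int), 2, 3, 4, 5] (PySem.Int.mod (k : Int) 5) 0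
        = List.getD [(1 : Int), 2, 3, 4, 5] (k % 5) 0 := by
      have hm : PySem.Int.mod (k : Int) 5 = ((k % 5 : Nat) : Int) := by
        exact_mod_cast PySem.Int.mod_natCast k 5
      rw [hm, PySem.List.pyGetD_natCast]
    have e2 : PySem.List.pyGetD [(2 : Int), 1, 2, 3, 2, 4, 2, 5] (PySem.Int.mod (k : Int) 8) 0
        = List.getD [(2 : Int), 1, 2, 3, 2, 4, 2, 5] (k % 8) 0 := by
      have hm : PySem.Int.mod (k : Int) 8 = ((k % 8 : Nat) : Int) := by
        exact_mod_cast PySem.Int.mod_natCast k 8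
      rw [hm, PySem.List.pyGetD_natCast]
    have e3 : PySem.List.pyGetD [(3 : Int), 3, 1, 1, 2, 2, 4, 4, 5, 5] (PySem.Int.mod (k : Int) 10) 0
        = List.getD [(3 : Int), 3, 1, 1, 2, 2, 4, 4, 5, 5] (k % 10) 0 := by
      have hm : PySem.Int.mod (k : Int) 10 = ((k % 10 : Nat) : Int) := by
        exact_mod_cast PySem.Int.mod_natCast k 10
      rw [hm, PySem.List.pyGetD_natCast]
    by_cases b1 : a = List.getD [(1 : Int), 2, 3, 4, 5] (k % 5) 0 <;>
      by_cases b2 : a = List.getD [(2 : Int), 1, 2, 3, 2, 4, 2, 5] (k % 8) 0 <;>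
        by_cases b3 : a = List.getD [(3 : Int), 3, 1, 1, 2, 2, 4, 4, 5, 5] (k % 10) 0 <;>
          (generalize hinit : stepA [s1, s2, s3] (k : Int) a = init0
           simp only [stepA] at hinit
           rw [e1, e2, e3] at hinit
           first | rw [if_pos b1] at hinit | rw [if_neg b1] at hinit
           first | rw [if_pos b2] at hinit | rw [if_neg b2] at hinit
           first | rw [if_pos b3] at hinit | rw [if_neg b3] at hinit
           try simp only [List.set_cons_zero, List.set_cons_succ, List.getD_cons_zero,
             List.getD_cons_succ] at hinit
           subst hinit
           rw [hcast, ih]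
           simp only [cm]
           (first | rw [if_pos b1] | rw [if_neg b1])
           (first | rw [if_pos b2] | rw [if_neg b2])
           (first | rw [if_pos b3] | rw [if_neg b3])
           simp only [List.cons.injEq]
           refine ⟨by ring, by ring, by ring, trivial⟩)

-- bridge: an index loop over range(len(xs)) reading xs[i] is a loop over enumerate(xs)
lemma A_range_to_enum (answers : List Int) (init : List Int) :
    (PySem.List.pyRange 0 (answers.length : Int) 1).foldl
        (fun sc i => stepA sc i (PySem.List.pyGetD answers i 0)) init
    = (PySem.List.enumerate answers (0 : Int)).foldl (fun sc p => stepA sc p.1 p.2) init := by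
  have key : ∀ (xs : List Int) (k : Nat) (init : List Int),
      (PySem.List.pyRange (k : Int) ((k : Int) + xs.length) 1).foldl
          (fun sc i => stepA sc i (PySem.List.pyGetD xs (i - (k : Int)) 0)) init
      = (PySem.List.enumerate xs (k : Int)).foldl (fun sc p => stepA sc p.1 p.2) init := by
    intro xs
    induction xs with
    | nil => intro k init; simp [PySem.List.pyRange_one_eq_nil]
    | cons x rest ih =>
      intro k init
      rw [PySem.List.pyRange_one_cons (by push_cast [List.length_cons]; omega), List.foldl_cons,
          PySem.List.enumerate_cons, List.foldl_cons]
      have hx : PySem.List.pyGetD (x :: rest) ((k : Int) - (k : Int)) 0 = x := by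
        norm_num [PySem.List.pyGetD, PySem.List.pyGet?, PySem.List.pyIdx?]
      rw [hx]
      have hcast : (k : Int) + 1 = ((k + 1 : Nat) : Int) := by push_cast; ring
      have hend : (k : Int) + (x :: rest).length = ((k + 1 : Nat) : Int) + rest.length := by
        push_cast; simp; ring
      rw [hend, hcast, ← ih (k + 1) (stepA init (k : Int) x)]
      apply PySem.List.foldl_congr_mem
      intro acc i hi
      have hik : ((k + 1 : Nat) : Int) ≤ i := (PySem.List.mem_pyRange_one.mp hi).1
      have hsh : PySem.List.pyGetD (x :: rest) (i - (k : Int)) 0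
               = PySem.List.pyGetD rest (i - ((k + 1 : Nat) : Int)) 0 := by
        have h1 : i - (k : Int) = ((i - (k : Int)).toNat : Int) := by push_cast at hik ⊢; omega
        have h2 : i - ((k + 1 : Nat) : Int) = ((i - ((k + 1 : Nat) : Int)).toNat : Int) := by
          push_cast at hik ⊢; omega
        rw [h1, h2, PySem.List.pyGetD_natCast, PySem.List.pyGetD_natCast]
        have h3 : (i - (k : Int)).toNat = (i - ((k + 1 : Nat) : Int)).toNat + 1 := by
          push_cast at hik ⊢; omega
        rw [h3]; simp
      rw [hsh]
  have h0 := key answers 0 init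
  simpa using h0

-- A's first loop equals the three B scores
lemma score_eq (answers : List Int) :
    (PySem.List.pyRange 0 (answers.length : Int) 1).foldl (solnStepA answers) [0, 0, 0]
    = [scoreB answers [1, 2, 3, 4, 5],
       scoreB answers [2, 1, 2, 3, 2, 4, 2, 5],
       scoreB answers [3, 3, 1, 1, 2, 2, 4, 4, 5, 5]] := by
  rw [solnStepA_eq, A_range_to_enum]
  have h := A_loop_enum answers 0 0 0 0
  simp only [Nat.cast_zero] at h
  rw [h]
  rw [scoreB_eq_cm _ _ 5 rfl (by simp), scoreB_eq_cm _ _ 8 rfl (by simp), scoreB_eq_cm _ _ 10 rfl (by simp)]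
  simp

-- A's second loop on a 3-element score list is B's enumerate-filter
lemma winners_core (c1 c2 c3 M : Int) :
    List.foldl (fun ans j => if PySem.List.pyGetD [c1, c2, c3] j 0 = M then ans ++ [j + 1]
                             else ans) ([] : List Int) [0, 1, 2]
    = List.filterMap (fun is => if is.2 = M then some (is.1 + 1) else none)
        (PySem.List.enumerate [c1, c2, c3] 0) := by
  by_cases h1 : c1 = M <;> by_cases h2 : c2 = M <;> by_cases h3 : c3 = M <;>
    simp [PySem.List.pyGetD_ofNat', PySem.List.enumerate, h1, h2, h3]

-- ===== VERDICT (by name: the statement is the Claim_ definition above) =====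
theorem solution_spec : Claim_equal_solution := by
  intro answers _
  unfold Spec_solution solution solution_alt
  rw [score_eq]
  set b1 := scoreB answers [1, 2, 3, 4, 5] with hb1
  set b2 := scoreB answers [2, 1, 2, 3, 2, 4, 2, 5] with hb2
  set b3 := scoreB answers [3, 3, 1, 1, 2, 2, 4, 4, 5, 5] with hb3
  show List.foldl (solnAppend [b1, b2, b3]) [] (PySem.List.pyRange 0 (3 : Int) 1)
    = List.filterMap
        (fun is => if is.2 = (PySem.List.max? [b1, b2, b3] (fun y => y)).getD 0
                   then some (is.1 + 1) else none)
        (PySem.List.enumerate [b1, b2, b3] 0)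
  rw [(by decide : PySem.List.pyRange 0 (3 : Int) 1 = [0, 1, 2])]
  exact winners_core _ _ _ _
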